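-- pv_equiv track=rewrite | github.com/monobinab/python | python/prep/String_operations.py | create_substring
-- ===== SOURCE A (Python) =====
-- def create_substring(input_string):
--     i = 0
--     new_str = ""
--     for i in range(len(input_string)):
--         if 4<=i<=6:
--             new_str = new_str + input_string[i]
--         else:
--             continue;
--     return new_str
-- ===== SOURCE B (Python) =====
-- def create_substring(input_string):
--     return "".join(input_string[4:7])
-- ===== Notes on version B (the rewrite author's own statement) =====
-- stated objective: simpler
-- what changed: Replaced the index-by-index loop with membership test 4<=i<=6 by the closed-form slice input_string[4:7] joined into a string.
import Mathlib
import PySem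

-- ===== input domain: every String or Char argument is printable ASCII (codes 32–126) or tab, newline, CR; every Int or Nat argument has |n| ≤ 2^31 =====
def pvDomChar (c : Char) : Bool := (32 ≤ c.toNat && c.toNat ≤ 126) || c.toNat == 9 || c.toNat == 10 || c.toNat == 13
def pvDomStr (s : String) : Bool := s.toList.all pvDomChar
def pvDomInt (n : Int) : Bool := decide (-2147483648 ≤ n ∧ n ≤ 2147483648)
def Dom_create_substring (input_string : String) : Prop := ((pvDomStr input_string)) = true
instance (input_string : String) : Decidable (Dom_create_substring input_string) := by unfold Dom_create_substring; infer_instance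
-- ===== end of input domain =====

-- B replaces A's index loop with the closed-form slice input_string[4:7]; simpler.

-- ===== PORT A =====
-- A: loop i over range(len(s)), append s[i] when 4 <= i <= 6
def create_substring (input_string : String) : String :=
  String.ofList ((List.range input_string.toList.length).foldl
    (fun acc (i : Nat) => if 4 ≤ i ∧ i ≤ 6 then acc ++ (PySem.List.pyGet? input_string.toList (i : Int)).toList else acc) [])

-- ===== PORT B =====
-- B: "".join(input_string[4:7])  (joining a string's slice is the slice itself)
def create_substring_alt (input_string : String) : String :=
  String.ofList (PySem.List.slice input_string.toList (some 4) (some 7))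

-- ===== PRECONDITION & SPEC =====
def Spec_create_substring (input_string : String) (out : String) : Prop := out = create_substring_alt input_string
instance (input_string : String) (out : String) : Decidable (Spec_create_substring input_string out) := by unfold Spec_create_substring; infer_instance

-- ===== CLAIM (what is proved, stated in full; the proofs are below) =====
def Claim_equal_create_substring : Prop := ∀ (input_string : String), Dom_create_substring input_string → Spec_create_substring input_string (create_substring input_string)

-- ===== LEMMAS AND PROOFS =====

lemma pv_slice47 (l : List Char) : PySem.List.slice l (some 4) (some 7) = (l.drop 4).take 3 := by
  have h := PySem.List.slice_natCast (xs := l) (a := 4) (b := 7)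
  simpa using h

lemma pv_foldl_noop (m : List ℕ) (l : List Char) (acc : List Char)
    (h : ∀ i ∈ m, ¬ (4 ≤ i ∧ i ≤ 6)) :
    m.foldl (fun acc i => if 4 ≤ i ∧ i ≤ 6 then acc ++ (l[i]?).toList else acc) acc = acc := by
  induction m generalizing acc with
  | nil => rfl
  | cons x xs ih =>
      simp only [List.foldl_cons]
      rw [if_neg (h x (by simp))]
      exact ih acc (fun i hi => h i (by simp [hi]))

lemma pv_key (l : List Char) :
    (List.range l.length).foldl
      (fun acc i => if 4 ≤ i ∧ i ≤ 6 then acc ++ (l[i]?).toList else acc) []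
      = (l.drop 4).take 3 := by
  rcases l with _ | ⟨a, _ | ⟨b, _ | ⟨c, _ | ⟨d, _ | ⟨e, _ | ⟨f, _ | ⟨g, t⟩⟩⟩⟩⟩⟩⟩
  · simp
  · norm_num [List.range_succ]
  · norm_num [List.range_succ]
  · norm_num [List.range_succ]
  · norm_num [List.range_succ]
  · norm_num [List.range_succ]
  · norm_num [List.range_succ]
  · have hlen : (a :: b :: c :: d :: e :: f :: g :: t).length = 7 + t.length := by
      simp; omega
    rw [hlen, List.range_add, List.foldl_append]
    have h7 : (List.range 7).foldl
        (fun acc i => if 4 ≤ i ∧ i ≤ 6 then acc ++ ((a :: b :: c :: d :: e :: f :: g :: t)[i]?).toList else acc) []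
        = [e, f, g] := by
      norm_num [List.range_succ]
    rw [h7, pv_foldl_noop _ _ _ (by intro i hi; simp at hi; rcases hi with ⟨k, _, rfl⟩; omega)]
    simp

-- ===== VERDICT (by name: the statement is the Claim_ definition above) =====
theorem create_substring_spec : Claim_equal_create_substring := by
  intro s _
  unfold Spec_create_substring create_substring create_substring_alt
  rw [pv_slice47]
  congr 1
  have := pv_key s.toList
  simpa using this
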